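-- pv_equiv track=rewrite | github.com/CrispyChillies/Image-Retrieval---Thesis-2026 | retrieval_analysis/visualize_mismatches.py | normalize_groups
-- ===== SOURCE A (Python) =====
-- from typing import Dict, List, Optional, Sequence, Tuple
--
-- DEFAULT_GROUPS = ("dino_correct_conv_wrong", "both_wrong")
--
-- def normalize_groups(groups: Sequence[str] | None) -> List[str]:
--     if not groups:
--         return list(DEFAULT_GROUPS)
--     normalized: List[str] = []
--     for group in groups:
--         for token in group.split(","):
--             stripped = token.strip()
--             if stripped:
--                 normalized.append(stripped)
--     return normalized or list(DEFAULT_GROUPS)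
-- ===== SOURCE B (Python) =====
-- DEFAULT_GROUPS = ("dino_correct_conv_wrong", "both_wrong")
--
-- def normalize_groups(groups):
--     if not groups:
--         return list(DEFAULT_GROUPS)
--     out = []
--     for group in groups:
--         buf = []       # current token, leading/trailing whitespace never committed
--         pending = []   # whitespace seen after a committed char, flushed only if more text follows
--         for ch in group:
--             if ch == ',':
--                 if buf:
--                     out.append(''.join(buf))
--                 buf = []
--                 pending = []
--             elif ch.isspace():
--                 if buf:
--                     pending.append(ch)
--             else:
--                 buf.extend(pending)
--                 pending = []
--                 buf.append(ch)
--         if buf: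
--             out.append(''.join(buf))
--     return out or list(DEFAULT_GROUPS)
-- ===== Notes on version B (the rewrite author's own statement) =====
-- stated objective: alternative
-- what changed: Replaces A's split-then-strip nested loops by a single character-level scan per group with an explicit buffer and pending-whitespace state, so tokens are built and trimmed on the fly without ever calling split or strip.
import Mathlib
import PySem

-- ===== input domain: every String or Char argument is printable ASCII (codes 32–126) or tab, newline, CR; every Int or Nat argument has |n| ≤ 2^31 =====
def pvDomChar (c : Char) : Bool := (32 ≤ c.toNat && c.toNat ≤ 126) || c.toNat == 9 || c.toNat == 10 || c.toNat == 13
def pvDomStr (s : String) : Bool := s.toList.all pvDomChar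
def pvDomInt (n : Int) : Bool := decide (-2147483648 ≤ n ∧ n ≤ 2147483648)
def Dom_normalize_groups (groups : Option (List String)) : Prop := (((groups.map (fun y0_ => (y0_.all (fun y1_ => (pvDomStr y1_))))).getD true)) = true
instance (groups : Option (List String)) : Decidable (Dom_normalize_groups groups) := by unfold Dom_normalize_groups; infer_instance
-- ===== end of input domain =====

-- B replaces A's split/strip nested loops by a single character-level scan per group
-- (buffer + pending-whitespace state); objective: alternative, same cost.

def DEFAULT_GROUPS : List String := ["dino_correct_conv_wrong", "both_wrong"]

-- ===== PORT A =====
-- group.split(",") is ported at code-point level as PySem.Chars.splitOn (exact for a nonempty separator);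
-- token.strip() as PySem.Chars.strip.
def normalize_groups (groups : Option (List String)) : List String :=
  match groups with
  | none => DEFAULT_GROUPS
  | some gs =>
    if gs = [] then DEFAULT_GROUPS
    else
      let normalized : List String :=
        gs.foldl (fun acc group =>
          (PySem.Chars.splitOn group.toList [',']).foldl (fun acc token =>
            let stripped := PySem.Chars.strip token
            if stripped ≠ [] then acc ++ [String.ofList stripped] else acc) acc) []
      if normalized = [] then DEFAULT_GROUPS else normalized

-- ===== PORT B =====
-- ch.isspace() is ported as PySem.Chars.isspace (exact on the ASCII domain);
-- the inner character loop of Source B becomes the structural recursion scanGroup over the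
-- group's characters with the same (buf, pending, out) state, flushing buf after the loop.
def scanGroup : List Char → List Char → List Char → List String → List String
  | [], buf, _pending, out =>
      if buf ≠ [] then out ++ [String.ofList buf] else out
  | c :: rest, buf, pending, out =>
      if c = ',' then
        scanGroup rest [] [] (if buf ≠ [] then out ++ [String.ofList buf] else out)
      else if PySem.Chars.isspace c then
        scanGroup rest buf (if buf ≠ [] then pending ++ [c] else pending) out
      else
        scanGroup rest (buf ++ pending ++ [c]) [] out

def normalize_groups_alt (groups : Option (List String)) : List String :=
  match groups with
  | none => DEFAULT_GROUPS
  | some gs =>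
    if gs = [] then DEFAULT_GROUPS
    else
      let out : List String := gs.foldl (fun out g => scanGroup g.toList [] [] out) []
      if out = [] then DEFAULT_GROUPS else out

-- ===== PRECONDITION & SPEC =====
def Spec_normalize_groups (groups : Option (List String)) (out : List String) : Prop := out = normalize_groups_alt groups
instance (groups : Option (List String)) (out : List String) : Decidable (Spec_normalize_groups groups out) := by unfold Spec_normalize_groups; infer_instance

-- ===== CLAIM (what is proved, stated in full; the proofs are below) =====
def Claim_equal_normalize_groups : Prop := ∀ (groups : Option (List String)), Dom_normalize_groups groups → Spec_normalize_groups groups (normalize_groups groups)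

-- ===== LEMMAS AND PROOFS =====

-- What one kept token contributes: the stripped token if nonempty, else nothing.
def emit (t : List Char) : Option String :=
  if PySem.Chars.strip t ≠ [] then some (String.ofList (PySem.Chars.strip t)) else none

-- Proof-side characterisation of splitting on the single character ','.
def split1 : List Char → List (List Char)
  | [] => [[]]
  | c :: rest =>
    if c = ',' then [] :: split1 rest
    else
      match split1 rest with
      | t :: ts => (c :: t) :: ts
      | [] => [[c]]

theorem split1_ne_nil (l : List Char) : split1 l ≠ [] := by
  cases l with
  | nil => simp [split1]
  | cons c rest =>
    simp only [split1]
    split_ifs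
    · simp
    · cases h : split1 rest <;> simp

theorem splitOn_go_spec : ∀ (fuel : Nat) (l cur : List Char) (acc : List (List Char)),
    l.length < fuel →
    PySem.Chars.splitOn.go [','] fuel l cur acc =
      acc.reverse ++ (match split1 l with
        | t :: ts => (cur.reverse ++ t) :: ts
        | [] => [cur.reverse]) := by
  intro fuel
  induction fuel with
  | zero => intro l cur acc h; omega
  | succ n ih =>
    intro l cur acc h
    cases l with
    | nil => simp [PySem.Chars.splitOn.go, split1]
    | cons c rest =>
      by_cases hc : c = ','
      · subst hc
        have hp : List.isPrefixOf [','] (',' :: rest) = true := by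
          simp [List.isPrefixOf]
        rw [PySem.Chars.splitOn.go]
        simp only [hp, if_true, List.length_cons, List.length_nil, List.drop_succ_cons, List.drop_zero]
        rw [ih rest [] (cur.reverse :: acc) (by simpa using Nat.lt_of_succ_lt_succ h)]
        simp only [split1, if_true]
        cases hs : split1 rest with
        | nil => exact absurd hs (split1_ne_nil rest)
        | cons t ts => simp
      · have hp : List.isPrefixOf [','] (c :: rest) = false := by
          simp [List.isPrefixOf]
          exact fun h' => hc h'.symm
        rw [PySem.Chars.splitOn.go]
        simp only [hp]
        rw [ih rest (c :: cur) acc (by simpa using Nat.lt_of_succ_lt_succ h)]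
        simp only [split1, if_neg hc]
        cases hs : split1 rest with
        | nil => exact absurd hs (split1_ne_nil rest)
        | cons t ts => simp

theorem splitOn_eq_split1 (s : List Char) : PySem.Chars.splitOn s [','] = split1 s := by
  unfold PySem.Chars.splitOn
  rw [splitOn_go_spec (s.length + 1) s [] [] (Nat.lt_succ_self _)]
  cases hs : split1 s with
  | nil => exact absurd hs (split1_ne_nil s)
  | cons t ts => simp

theorem split1_append (a b : List Char) : split1 (a ++ ',' :: b) = split1 a ++ split1 b := by
  induction a with
  | nil => simp [split1]
  | cons c a ih =>
    by_cases hc : c = ','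
    · subst hc; simp [split1, ih]
    · simp only [List.cons_append, split1, if_neg hc, ih]
      cases hs : split1 a with
      | nil => exact absurd hs (split1_ne_nil a)
      | cons t ts => simp

theorem split1_no_comma (x : List Char) (h : ',' ∉ x) : split1 x = [x] := by
  induction x with
  | nil => rfl
  | cons c rest ih =>
    have hc : c ≠ ',' := fun hh => h (hh ▸ List.mem_cons_self)
    simp only [split1, if_neg hc, ih (fun hm => h (List.mem_cons_of_mem _ hm))]

-- A's inner loop over one group's tokens appends exactly the kept stripped tokens.
theorem inner_foldl (toks : List (List Char)) (acc : List String) :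
    toks.foldl (fun acc token =>
      let stripped := PySem.Chars.strip token
      if stripped ≠ [] then acc ++ [String.ofList stripped] else acc) acc
    = acc ++ toks.filterMap emit := by
  induction toks generalizing acc with
  | nil => simp
  | cons t ts ih =>
    simp only [List.foldl_cons, List.filterMap_cons]
    by_cases h : PySem.Chars.strip t ≠ []
    · simp only [ih]; simp [emit, h]
    · simp only [ih]; simp at h; simp [emit, h]

theorem outer_foldl (gs : List String) (acc : List String) :
    gs.foldl (fun acc group =>
      (PySem.Chars.splitOn group.toList [',']).foldl (fun acc token =>
        let stripped := PySem.Chars.strip token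
        if stripped ≠ [] then acc ++ [String.ofList stripped] else acc) acc) acc
    = acc ++ gs.flatMap (fun g => (split1 g.toList).filterMap emit) := by
  induction gs generalizing acc with
  | nil => simp
  | cons g gs ih =>
    simp only [List.foldl_cons, List.flatMap_cons]
    rw [splitOn_eq_split1, inner_foldl, ih, List.append_assoc]

-- Stripping lemmas relating B's (buf, pending) state to strip of the token so far.
theorem strip_ws_cons (c : Char) (t : List Char) (hc : PySem.Chars.isspace c = true) :
    PySem.Chars.strip (c :: t) = PySem.Chars.strip t := by
  simp [PySem.Chars.strip, PySem.Chars.lstrip, hc]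

theorem strip_nil : PySem.Chars.strip [] = [] := rfl

theorem emit_ws_cons (c : Char) (t : List Char) (hc : PySem.Chars.isspace c = true) :
    emit (c :: t) = emit t := by
  unfold emit; rw [strip_ws_cons c t hc]

theorem strip_of_state (buf pending : List Char)
    (hp : ∀ c ∈ pending, PySem.Chars.isspace c = true)
    (he : buf = [] → pending = [])
    (hh : ∀ d bs, buf = d :: bs → PySem.Chars.isspace d = false)
    (hl : ∀ e es, buf.reverse = e :: es → PySem.Chars.isspace e = false) :
    PySem.Chars.strip (buf ++ pending) = buf := by
  cases hb : buf with
  | nil => rw [he hb]; rfl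
  | cons d bs =>
    have hd := hh d bs hb
    have h1 : PySem.Chars.lstrip ((d :: bs) ++ pending) = (d :: bs) ++ pending := by
      simp [PySem.Chars.lstrip, hd]
    have hrevne : buf.reverse ≠ [] := by simp [hb]
    obtain ⟨e, es, hrev⟩ := List.exists_cons_of_ne_nil hrevne
    have hce := hl e es hrev
    have hpend : List.dropWhile PySem.Chars.isspace pending.reverse = [] := by
      rw [List.dropWhile_eq_nil_iff]
      intro c hc; exact hp c (List.mem_reverse.mp hc)
    rw [hb] at hrev
    have : PySem.Chars.rstrip ((d :: bs) ++ pending) = d :: bs := by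
      unfold PySem.Chars.rstrip
      rw [List.reverse_append, List.dropWhile_append, hpend]
      simp only [List.isEmpty_nil, if_true]
      rw [hrev, List.dropWhile_cons, hce]
      simp only [Bool.false_eq_true, if_false]
      rw [← hrev, List.reverse_reverse]
    unfold PySem.Chars.strip
    rw [h1, this]

-- The core invariant: scanGroup emits exactly the kept stripped tokens of buf++pending++l.
theorem scan_spec : ∀ (l buf pending : List Char) (out : List String),
    (∀ c ∈ pending, PySem.Chars.isspace c = true) →
    (buf = [] → pending = []) →
    (∀ d bs, buf = d :: bs → PySem.Chars.isspace d = false) →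
    (∀ e es, buf.reverse = e :: es → PySem.Chars.isspace e = false) →
    (',' ∉ buf) → (',' ∉ pending) →
    scanGroup l buf pending out
      = out ++ (split1 (buf ++ pending ++ l)).filterMap emit := by
  intro l
  induction l with
  | nil =>
    intro buf pending out hp he hh hl hcb hcp
    have hstrip := strip_of_state buf pending hp he hh hl
    have hnc : ',' ∉ buf ++ pending := by
      simp only [List.mem_append]; rintro (h | h); exacts [hcb h, hcp h]
    rw [scanGroup]
    simp only [List.append_nil]
    rw [split1_no_comma _ hnc]
    by_cases hb : buf = []
    · simp [hb, emit, he hb, strip_nil]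
    · simp [hb, emit, hstrip]
  | cons c rest ih =>
    intro buf pending out hp he hh hl hcb hcp
    by_cases hc : c = ','
    · subst hc
      rw [scanGroup]
      simp only [if_true]
      have hstrip := strip_of_state buf pending hp he hh hl
      have hnc : ',' ∉ buf ++ pending := by
        simp only [List.mem_append]; rintro (h | h); exacts [hcb h, hcp h]
      have hsplit : split1 (buf ++ pending ++ ',' :: rest) = (buf ++ pending) :: split1 rest := by
        rw [split1_append, split1_no_comma _ hnc]; rfl
      rw [ih [] [] _ (by simp) (fun _ => rfl) (by simp) (by simp) (by simp) (by simp)]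
      rw [hsplit]
      simp only [List.filterMap_cons, List.nil_append]
      by_cases hb : buf = []
      · simp [hb, emit, he hb, strip_nil]
      · simp [hb, emit, hstrip, List.append_assoc]
    · by_cases hw : PySem.Chars.isspace c = true
      · rw [scanGroup]
        simp only [if_neg hc, hw, if_true]
        by_cases hb : buf = []
        · have hpnil := he hb
          subst hb; subst hpnil
          rw [if_neg (fun h : ([] : List Char) ≠ [] => h rfl)]
          rw [ih [] [] out (by simp) (fun _ => rfl) (by simp) (by simp) (by simp) (by simp)]
          simp only [List.nil_append]
          congr 1
          have hrne := split1_ne_nil rest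
          obtain ⟨t, ts, hts⟩ := List.exists_cons_of_ne_nil hrne
          rw [show split1 (c :: rest) = (c :: t) :: ts by
                simp only [split1, if_neg hc, hts]]
          rw [hts]
          simp only [List.filterMap_cons]
          rw [emit_ws_cons c t hw]
        · simp only [ne_eq, if_pos hb]
          rw [ih buf (pending ++ [c]) out
                (by intro x hx; rcases List.mem_append.mp hx with h | h
                    · exact hp x h
                    · simp at h; subst h; exact hw)
                (fun h => absurd h hb) hh hl hcb
                (by simp only [List.mem_append]; rintro (h | h)
                    · exact hcp h
                    · simp at h; exact hc h.symm)]
          congr 2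
          simp
      · have hwf : PySem.Chars.isspace c = false := by
          cases h : PySem.Chars.isspace c
          · rfl
          · exact absurd h hw
        rw [scanGroup]
        simp only [if_neg hc, hwf, Bool.false_eq_true, if_neg (by simp : ¬ False)]
        rw [ih (buf ++ pending ++ [c]) [] out (by simp)
              (by intro h; rfl)
              (by intro d bs hd
                  by_cases hb : buf = []
                  · have hpnil := he hb
                    rw [hb, hpnil] at hd
                    simp at hd
                    rw [← hd.1]; exact hwf
                  · obtain ⟨d', bs', hb'⟩ := List.exists_cons_of_ne_nil hb
                    rw [hb'] at hd
                    simp only [List.cons_append] at hd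
                    injection hd with h1 _
                    rw [← h1]; exact hh d' bs' hb')
              (by intro e es hrev
                  simp only [List.append_assoc, List.reverse_append] at hrev
                  simp at hrev
                  rw [← hrev.1]; exact hwf)
              (by simp only [List.mem_append]
                  rintro ((h | h) | h)
                  · exact hcb h
                  · exact hcp h
                  · simp at h; exact hc h.symm)
              (by simp)]
        congr 2
        simp

-- B's outer fold collects the same flatMap as A.
theorem b_foldl (gs : List String) (out : List String) :
    gs.foldl (fun out g => scanGroup g.toList [] [] out) out
      = out ++ gs.flatMap (fun g => (split1 g.toList).filterMap emit) := by
  induction gs generalizing out with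
  | nil => simp
  | cons g gs ih =>
    simp only [List.foldl_cons, List.flatMap_cons]
    rw [scan_spec g.toList [] [] out (by simp) (fun _ => rfl) (by simp) (by simp) (by simp) (by simp)]
    simp only [List.nil_append]
    rw [ih, List.append_assoc]

-- ===== VERDICT (by name: the statement is the Claim_ definition above) =====
theorem normalize_groups_spec : Claim_equal_normalize_groups := by
  intro groups _
  unfold Spec_normalize_groups normalize_groups normalize_groups_alt
  cases groups with
  | none => rfl
  | some gs =>
    by_cases hgs : gs = []
    · simp [hgs]
    · simp only [if_neg hgs]
      rw [outer_foldl, b_foldl]
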